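-- pv_equiv track=rewrite | github.com/masphdtrain25/MasPhD | src/masphd/darwin/extract_segments.py | _schedule_endpoints
-- ===== SOURCE A (Python) =====
-- from typing import Any, Dict, List, Optional, Tuple
--
-- def _schedule_endpoints(schedules: List[Dict[str, Any]]) -> Tuple[Optional[str], Optional[str]]:
--     """
--     Returns (origin_tpl, dest_tpl) from schedule rows when present.
--     schedule row example:
--       {'tpl': 'CREWE', 'type': 'OR', ...}
--       {'tpl': 'EUSTON', 'type': 'DT', ...}
--     """
--     origin = None
--     dest = None
--     for r in schedules or []:
--         t = r.get("type")
--         tpl = r.get("tpl")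
--         if not tpl or not t:
--             continue
--         if t == "OR":
--             origin = tpl
--         elif t == "DT":
--             dest = tpl
--     return origin, dest
-- ===== SOURCE B (Python) =====
-- def _schedule_endpoints(schedules):
--     origin = None
--     dest = None
--     for r in reversed(schedules or []):
--         t = r.get("type")
--         tpl = r.get("tpl")
--         if not tpl or not t:
--             continue
--         if t == "OR" and origin is None:
--             origin = tpl
--         elif t == "DT" and dest is None:
--             dest = tpl
--         if origin is not None and dest is not None:
--             break
--     return origin, dest
-- ===== Notes on version B (the rewrite author's own statement) =====
-- stated objective: alternative
-- what changed: B scans the schedule rows in reverse, takes the first OR/DT hit for each endpoint (the last forward occurrence), and breaks as soon as both are found, instead of A's full forward pass that keeps overwriting.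
import Mathlib
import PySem

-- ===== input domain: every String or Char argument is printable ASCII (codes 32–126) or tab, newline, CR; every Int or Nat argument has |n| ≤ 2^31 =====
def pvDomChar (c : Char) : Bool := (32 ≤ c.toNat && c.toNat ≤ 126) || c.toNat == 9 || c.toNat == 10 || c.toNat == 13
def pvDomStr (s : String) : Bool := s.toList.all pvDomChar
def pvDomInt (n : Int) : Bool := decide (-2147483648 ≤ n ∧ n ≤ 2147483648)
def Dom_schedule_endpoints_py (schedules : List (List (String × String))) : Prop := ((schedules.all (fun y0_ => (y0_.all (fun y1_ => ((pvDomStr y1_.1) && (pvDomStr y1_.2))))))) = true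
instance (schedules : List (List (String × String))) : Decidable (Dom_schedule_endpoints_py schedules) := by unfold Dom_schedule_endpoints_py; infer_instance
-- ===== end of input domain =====

-- B scans the rows in reverse with early exit once both endpoints are found; A makes a full
-- forward pass overwriting. Equivalence of return values is proved on all inputs.

-- ===== PORT A =====
-- one iteration of A's forward loop body (continue/overwrite branches in source order)
def pvStepA (st : Option String × Option String) (r : List (String × String)) :
    Option String × Option String :=
  let t := (PySem.Dict.mk r).get? "type"
  let tpl := (PySem.Dict.mk r).get? "tpl"
  if tpl = none ∨ tpl = some "" ∨ t = none ∨ t = some "" then st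
  else if t = some "OR" then (tpl, st.2)
  else if t = some "DT" then (st.1, tpl)
  else st

def schedule_endpoints_py (schedules : List (List (String × String))) :
    Option String × Option String :=
  schedules.foldl pvStepA (none, none)

-- ===== PORT B =====
-- B's reversed loop with `continue`, set-once updates and `break` when both endpoints are set
def pvLoopB : List (List (String × String)) → Option String × Option String →
    Option String × Option String
  | [], st => st
  | r :: rest, (o, d) =>
    let t := (PySem.Dict.mk r).get? "type"
    let tpl := (PySem.Dict.mk r).get? "tpl"
    if tpl = none ∨ tpl = some "" ∨ t = none ∨ t = some "" then
      pvLoopB rest (o, d)          -- continue (skips the break check, as in Python)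
    else
      let o' := if t = some "OR" ∧ o = none then tpl else o
      let d' := if ¬ (t = some "OR" ∧ o = none) ∧ t = some "DT" ∧ d = none then tpl else d
      if o' ≠ none ∧ d' ≠ none then (o', d')   -- break
      else pvLoopB rest (o', d')

def schedule_endpoints_py_alt (schedules : List (List (String × String))) :
    Option String × Option String :=
  pvLoopB schedules.reverse (none, none)

-- ===== PRECONDITION & SPEC =====
def Spec_schedule_endpoints_py (schedules : List (List (String × String))) (out : Option String × Option String) : Prop := out = schedule_endpoints_py_alt schedules
instance (schedules : List (List (String × String))) (out : Option String × Option String) : Decidable (Spec_schedule_endpoints_py schedules out) := by unfold Spec_schedule_endpoints_py; infer_instance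

-- ===== CLAIM (what is proved, stated in full; the proofs are below) =====
def Claim_equal_schedule_endpoints_py : Prop := ∀ (schedules : List (List (String × String))), Dom_schedule_endpoints_py schedules → Spec_schedule_endpoints_py schedules (schedule_endpoints_py schedules)

-- ===== LEMMAS AND PROOFS =====

-- first valid row of the given type in the list (first match wins)
def pvFirst (ty : String) : List (List (String × String)) → Option String
  | [] => none
  | r :: rest =>
    let t := (PySem.Dict.mk r).get? "type"
    let tpl := (PySem.Dict.mk r).get? "tpl"
    if tpl = none ∨ tpl = some "" ∨ t = none ∨ t = some "" then pvFirst ty rest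
    else if t = some ty then tpl
    else pvFirst ty rest

theorem pvFirst_cons (ty : String) (r : List (String × String))
    (rest : List (List (String × String))) :
    pvFirst ty (r :: rest) =
      (if (PySem.Dict.mk r).get? "tpl" = none ∨ (PySem.Dict.mk r).get? "tpl" = some "" ∨
          (PySem.Dict.mk r).get? "type" = none ∨ (PySem.Dict.mk r).get? "type" = some "" then
        pvFirst ty rest
      else if (PySem.Dict.mk r).get? "type" = some ty then (PySem.Dict.mk r).get? "tpl"
      else pvFirst ty rest) := rfl

theorem pvFirst_append (ty : String) (xs ys : List (List (String × String))) :
    pvFirst ty (xs ++ ys) = (pvFirst ty xs).or (pvFirst ty ys) := by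
  induction xs with
  | nil => simp [pvFirst]
  | cons r rest ih =>
    rw [List.cons_append, pvFirst_cons, pvFirst_cons]
    split_ifs with h1 h2 <;> rcases htpl : (PySem.Dict.mk r).get? "tpl" with _ | s <;> simp_all

-- the break in B never changes the result: B computes first-match-wins on each component
theorem pvLoopB_eq (xs : List (List (String × String))) (o d : Option String) :
    pvLoopB xs (o, d) = (o.or (pvFirst "OR" xs), d.or (pvFirst "DT" xs)) := by
  induction xs generalizing o d with
  | nil => rcases o <;> rcases d <;> rfl
  | cons r rest ih =>
    rw [pvFirst_cons, pvFirst_cons]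
    simp only [pvLoopB]
    split_ifs with h1 h2 h3 h4 h5 h6 h7 h8 h9 h10 h11 h12 h13 h14 <;>
      (try rw [ih]) <;>
      rcases htpl : (PySem.Dict.mk r).get? "tpl" with _ | s <;>
      rcases o with _ | ov <;> rcases d with _ | dv <;>
      simp_all

-- one forward step of A appends the row's contribution behind the accumulator
theorem pvStepA_eq (st : Option String × Option String) (r : List (String × String)) :
    pvStepA st r = ((pvFirst "OR" [r]).or st.1, (pvFirst "DT" [r]).or st.2) := by
  rcases st with ⟨o, d⟩
  rw [pvFirst_cons, pvFirst_cons]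
  simp only [pvStepA]
  split_ifs <;> rcases htpl : (PySem.Dict.mk r).get? "tpl" with _ | s <;> simp_all [pvFirst]

theorem pvFoldA_eq (xs : List (List (String × String))) (o d : Option String) :
    xs.foldl pvStepA (o, d) =
      ((pvFirst "OR" xs.reverse).or o, (pvFirst "DT" xs.reverse).or d) := by
  induction xs generalizing o d with
  | nil => simp [pvFirst]
  | cons r rest ih =>
    rw [List.foldl_cons, pvStepA_eq, ih, List.reverse_cons, pvFirst_append, pvFirst_append]
    simp [Option.or_assoc]

-- ===== VERDICT (by name: the statement is the Claim_ definition above) =====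
theorem schedule_endpoints_py_spec : Claim_equal_schedule_endpoints_py := by
  intro schedules _
  unfold Spec_schedule_endpoints_py schedule_endpoints_py schedule_endpoints_py_alt
  rw [pvFoldA_eq, pvLoopB_eq]
  simp
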